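-- pv_equiv track=rewrite | github.com/iaraacruuz/Parcial-Laboratoio-UTN | parcial.py | cantidad_por_tipo
-- ===== SOURCE A (Python) =====
-- def cantidad_por_tipo(lista_pokemones: list) -> dict:
--     '''
--         Brief: La función cuenta la cantidad de pokémones por tipo.
--         Parámetros:
--         lista_pokemones (lista): Una lista de diccionarios de pokémones. Cada diccionario representa
--         un pokemon y tiene una clave llamada 'tipo' que contiene una cadena de texto con uno o varios
--         tipos separados por '/'.
--         Retorno: Un diccionario que muestra la cantidad de pokemones por tipo. Las claves del diccionario son los tipos y
--         los valores son las cantidades correspondientes de pokémones de cada tipo.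
--     '''
--
--     cantidad_por_tipo = {}
--     for pokemon in lista_pokemones:
--         tipos = pokemon['Tipo'].split('/')
--         for tipo in tipos:
--             tipo_minuscula = tipo.lower()
--             if tipo_minuscula in cantidad_por_tipo:
--                 cantidad_por_tipo[tipo_minuscula] += 1
--             else:
--                 cantidad_por_tipo[tipo_minuscula] = 1
--
--     cantidad_por_tipo_combinado = {}
--     for tipo, cantidad in cantidad_por_tipo.items():
--         tipo_combined = next((t for t in cantidad_por_tipo_combinado.keys() if t.lower() == tipo.lower()), tipo)
--         if tipo_combined in cantidad_por_tipo_combinado: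
--             cantidad_por_tipo_combinado[tipo_combined] += cantidad
--         else:
--             cantidad_por_tipo_combinado[tipo_combined] = cantidad
--
--     return cantidad_por_tipo_combinado
-- ===== SOURCE B (Python) =====
-- def cantidad_por_tipo(lista_pokemones: list) -> dict:
--     '''Cuenta pokemones por tipo: aplana los tipos (en minuscula) y arma el
--     diccionario contando cada tipo distinto en la lista aplanada.'''
--     tipos = [t.lower() for pokemon in lista_pokemones for t in pokemon['Tipo'].split('/')]
--     return {t: tipos.count(t) for t in dict.fromkeys(tipos)}
-- ===== Notes on version B (the rewrite author's own statement) =====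
-- stated objective: simpler
-- what changed: A keeps a running counter dict with an in/else branch and then re-combines it in a second loop with a linear next() scan over the keys; B instead flattens all lowered types into one list and builds the dict in one comprehension as {t: flat.count(t)} over the first-occurrence-deduplicated types, with no accumulator and no combining pass.
import Mathlib
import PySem

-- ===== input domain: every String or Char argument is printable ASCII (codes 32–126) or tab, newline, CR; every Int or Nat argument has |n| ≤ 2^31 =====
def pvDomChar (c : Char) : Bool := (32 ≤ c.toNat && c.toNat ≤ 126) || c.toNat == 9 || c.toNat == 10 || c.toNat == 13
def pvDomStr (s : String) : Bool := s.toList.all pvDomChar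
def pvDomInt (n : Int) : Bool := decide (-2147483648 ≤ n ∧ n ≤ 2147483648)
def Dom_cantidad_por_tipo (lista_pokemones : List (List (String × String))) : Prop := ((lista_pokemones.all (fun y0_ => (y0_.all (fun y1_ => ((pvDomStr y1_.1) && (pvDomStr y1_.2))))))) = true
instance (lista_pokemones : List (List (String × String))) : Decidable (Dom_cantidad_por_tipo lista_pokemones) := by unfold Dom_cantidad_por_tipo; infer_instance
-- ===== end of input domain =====

-- B replaces A's running counter (in/else branch) plus second combining loop by one flat list of
-- lowered types and a single dict comprehension {t: flat.count(t)} over the deduplicated types.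

-- ===== PORT A =====
-- inner-loop body of A's first loop: 'tipo_minuscula in dict' then '+= 1' else '= 1'
def cptStepA (d : PySem.Dict String Int) (tipo : String) : PySem.Dict String Int :=
  let tipo_minuscula := PySem.Str.lower tipo
  match d.get? tipo_minuscula with
  | some n => d.insert tipo_minuscula (n + 1)
  | none   => d.insert tipo_minuscula 1

-- body of A's second (combining) loop: next((t for t in keys if t.lower()==tipo.lower()), tipo)
def cptStepA2 (d : PySem.Dict String Int) (tc : String × Int) : PySem.Dict String Int :=
  let tipo_combined := (d.keys.find? (fun t => PySem.Str.lower t == PySem.Str.lower tc.1)).getD tc.1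
  match d.get? tipo_combined with
  | some n => d.insert tipo_combined (n + tc.2)
  | none   => d.insert tipo_combined tc.2

def cantidad_por_tipo (lista_pokemones : List (List (String × String))) : List (String × Int) :=
  let d1 := lista_pokemones.foldl (fun d pokemon =>
      let tipos := ((PySem.Str.split? (((PySem.Dict.mk pokemon).get? "Tipo").getD "") "/").getD [])
      tipos.foldl cptStepA d) PySem.Dict.empty
  let d2 := d1.items.foldl cptStepA2 PySem.Dict.empty
  d2.items

-- ===== PORT B =====
def cantidad_por_tipo_alt (lista_pokemones : List (List (String × String))) : List (String × Int) :=
  let tipos := lista_pokemones.flatMap (fun pokemon =>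
      ((PySem.Str.split? (((PySem.Dict.mk pokemon).get? "Tipo").getD "") "/").getD []).map PySem.Str.lower)
  (PySem.List.dedup tipos).map (fun t => (t, (tipos.count t : Int)))

-- ===== PRECONDITION & SPEC =====
-- Pre_ excludes exactly the inputs where the Python A raises KeyError: a pokemon dict without the key 'Tipo'.
def Pre_cantidad_por_tipo (lista_pokemones : List (List (String × String))) : Prop :=
  (lista_pokemones.all (fun pokemon => pokemon.any (fun kv => kv.1 == "Tipo"))) = true
instance (lista_pokemones : List (List (String × String))) : Decidable (Pre_cantidad_por_tipo lista_pokemones) := by unfold Pre_cantidad_por_tipo; infer_instance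
def pvWitness_cantidad_por_tipo : (List (List (String × String))) := [[("Tipo", "Fuego/Agua")], [("Tipo", "agua")]]
def Spec_cantidad_por_tipo (lista_pokemones : List (List (String × String))) (out : List (String × Int)) : Prop := out = cantidad_por_tipo_alt lista_pokemones
instance (lista_pokemones : List (List (String × String))) (out : List (String × Int)) : Decidable (Spec_cantidad_por_tipo lista_pokemones out) := by unfold Spec_cantidad_por_tipo; infer_instance

-- ===== CLAIM (what is proved, stated in full; the proofs are below) =====
def Claim_equal_cantidad_por_tipo : Prop := ∀ (lista_pokemones : List (List (String × String))), Dom_cantidad_por_tipo lista_pokemones → Pre_cantidad_por_tipo lista_pokemones → Spec_cantidad_por_tipo lista_pokemones (cantidad_por_tipo lista_pokemones)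

-- ===== LEMMAS AND PROOFS =====

theorem char_le_iff (c d : Char) : c ≤ d ↔ c.toNat ≤ d.toNat := Iff.rfl

theorem lowerChar_idem (c : Char) :
    PySem.Chars.lowerChar (PySem.Chars.lowerChar c) = PySem.Chars.lowerChar c := by
  unfold PySem.Chars.lowerChar PySem.Chars.isupper
  by_cases h : 'A' ≤ c ∧ c ≤ 'Z'
  · have hA : 65 ≤ c.toNat := (char_le_iff _ _).1 h.1
    have hZ : c.toNat ≤ 90 := (char_le_iff _ _).1 h.2
    have hz90 : ('Z').toNat = 90 := rfl
    have hval : (Char.ofNat (c.toNat + 32)).toNat = c.toNat + 32 := by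
      rw [Char.toNat_ofNat, if_pos]; exact Or.inl (by omega)
    have hnot : ¬ (Char.ofNat (c.toNat + 32) ≤ 'Z') := by
      rw [char_le_iff, hval, hz90]; omega
    simp [h.1, h.2, hnot]
  · rw [not_and_or] at h
    rcases h with h | h <;> simp [h]

theorem lower_idem (s : String) : PySem.Str.lower (PySem.Str.lower s) = PySem.Str.lower s := by
  apply String.toList_injective
  simp [PySem.Str.toList_lower, PySem.Chars.lower, lowerChar_idem]

-- the flat list of lowered types that B works on
def cptFlat (lista_pokemones : List (List (String × String))) : List String :=
  lista_pokemones.flatMap (fun pokemon =>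
      ((PySem.Str.split? (((PySem.Dict.mk pokemon).get? "Tipo").getD "") "/").getD []).map PySem.Str.lower)

theorem cptStepA_eq (d : PySem.Dict String Int) (t : String) :
    cptStepA d t = d.insert (PySem.Str.lower t) (d.getD (PySem.Str.lower t) 0 + 1) := by
  rw [PySem.Dict.getD_eq_get?_getD]
  cases hg : d.get? (PySem.Str.lower t) with
  | none => simp [cptStepA, hg]
  | some n => simp [cptStepA, hg]

-- A's first loop is the flat counter of B's flat list
theorem d1_eq_counter (lista : List (List (String × String))) :
    lista.foldl (fun d pokemon =>
      (((PySem.Str.split? (((PySem.Dict.mk pokemon).get? "Tipo").getD "") "/").getD [])).foldl cptStepA d)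
      PySem.Dict.empty = PySem.Dict.counter (cptFlat lista) := by
  rw [← PySem.Dict.foldl_insert_getD_add_one_eq_counter]
  unfold cptFlat
  rw [List.foldl_flatMap]
  congr 1
  funext d pokemon
  rw [List.foldl_map]
  congr 1
  funext d' t
  exact cptStepA_eq d' t

-- A's second loop rebuilds, unchanged, any items list whose keys are Nodup and fixed by lower
theorem second_loop_id (L : List (String × Int)) (d : PySem.Dict String Int)
    (hnd : (d.keys ++ L.map Prod.fst).Nodup)
    (hfix : ∀ k ∈ d.keys ++ L.map Prod.fst, PySem.Str.lower k = k) :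
    (L.foldl cptStepA2 d).items = d.items ++ L := by
  induction L generalizing d with
  | nil => simp
  | cons kv rest ih =>
    obtain ⟨k, v⟩ := kv
    have hkfix : PySem.Str.lower k = k := hfix k (by simp)
    have hknotin : k ∉ d.keys := by
      have := List.disjoint_of_nodup_append hnd
      intro hmem; exact this hmem (by simp)
    have hfind : d.keys.find? (fun t => PySem.Str.lower t == PySem.Str.lower k) = none := by
      rw [List.find?_eq_none]
      intro t ht
      have htfix : PySem.Str.lower t = t := hfix t (by simp [ht])
      simp [htfix, hkfix]
      intro heq; exact hknotin (heq ▸ ht)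
    have hget : d.get? k = none := (PySem.Dict.get?_eq_none_iff_not_mem_keys d k).2 hknotin
    have hcont : d.contains k = false := by
      rw [PySem.Dict.contains_eq_isSome_get?, hget]; rfl
    have hstep : cptStepA2 d (k, v) = d.insert k v := by
      simp only [cptStepA2, hfind]
      simp [hget]
    rw [List.foldl_cons, hstep,
      ih (d.insert k v)
        (by rw [PySem.Dict.keys_insert_of_not_contains d v hcont]; simpa using hnd)
        (by rw [PySem.Dict.keys_insert_of_not_contains d v hcont]; intro x hx; apply hfix;
            simp at hx ⊢; tauto),
      PySem.Dict.items_insert_of_not_contains d v hcont]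
    simp

-- every element of the flat list is lower of something, hence fixed by lower
theorem cptFlat_lower_fixed (lista : List (List (String × String))) :
    ∀ t ∈ cptFlat lista, PySem.Str.lower t = t := by
  intro t ht
  unfold cptFlat at ht
  simp only [List.mem_flatMap, List.mem_map] at ht
  obtain ⟨p, _, y, _, rfl⟩ := ht
  exact lower_idem y

-- ===== VERDICT (by name: the statement is the Claim_ definition above) =====
theorem cantidad_por_tipo_spec : Claim_equal_cantidad_por_tipo := by
  intro lista _ _
  unfold Spec_cantidad_por_tipo cantidad_por_tipo cantidad_por_tipo_alt
  rw [d1_eq_counter]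
  have hkeys : (PySem.Dict.counter (cptFlat lista)).items.map Prod.fst
      = (PySem.Dict.counter (cptFlat lista)).keys := rfl
  rw [second_loop_id _ PySem.Dict.empty
      (by rw [PySem.Dict.keys_empty, List.nil_append, hkeys]
          exact PySem.Dict.nodup_keys_counter _)
      (by rw [PySem.Dict.keys_empty, List.nil_append, hkeys, PySem.Dict.keys_counter]
          intro k hk
          exact cptFlat_lower_fixed lista k ((PySem.Set.mem_ofList _ _).1 hk))]
  rw [PySem.Dict.items_counter]
  show PySem.Dict.empty.items ++ _
      = (PySem.List.dedup (cptFlat lista)).map (fun t => (t, (List.count t (cptFlat lista) : Int)))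
  rw [PySem.List.dedup_eq_ofList]
  simp [PySem.Dict.empty]
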